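-- pv_equiv track=rewrite | github.com/ypradhan222/mtech_code | ALgorithms/heapify_topdown.py | heapify_topdown
-- ===== SOURCE A (Python) =====
-- def heapify_topdown(arr,index):
--    # root = index
--    # left = 2*index +1
--    # right = 2*index +2
--    # # size = len(arr)
--    # if left<size and arr[left]<arr[root]:
--    #    root = left
--    # if right<size and arr[right]<arr[root]:
--    #    root = right
--    # if root!=index:
--    #    arr[root],arr[index] = arr[index],arr[root]
--    #    heapify_topdown(arr,size,root)
--    count = 0
--    root = (index-1)//2
--    while root >=0 and arr[index]<arr[root]:
--       arr[index],arr[root]= arr[root],arr[index]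
--       count +=1
--       index = root
--       root = (index-1)//2
--    return count
-- ===== SOURCE B (Python) =====
-- def heapify_topdown(arr, index):
--     # Pure scan up the parent chain: the sifted value v = arr[index] keeps moving up,
--     # so the swap count is the number of consecutive ancestors strictly greater than v.
--     # (Unlike A, this does not mutate arr; equivalence is about the return value.)
--     count = 0
--     i = (index - 1) // 2
--     if i < 0:
--         return 0
--     v = arr[index]
--     while i >= 0 and arr[i] > v:
--         count += 1
--         i = (i - 1) // 2
--     return count
-- ===== Notes on version B (the rewrite author's own statement) =====
-- stated objective: alternative
-- what changed: B replaces A's swap-and-repeat loop by a pure read-only scan up the parent chain: it fixes v = arr[index] once and counts the consecutive ancestors strictly greater than v, performing no swaps (return value only; B does not mutate arr).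
import Mathlib
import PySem

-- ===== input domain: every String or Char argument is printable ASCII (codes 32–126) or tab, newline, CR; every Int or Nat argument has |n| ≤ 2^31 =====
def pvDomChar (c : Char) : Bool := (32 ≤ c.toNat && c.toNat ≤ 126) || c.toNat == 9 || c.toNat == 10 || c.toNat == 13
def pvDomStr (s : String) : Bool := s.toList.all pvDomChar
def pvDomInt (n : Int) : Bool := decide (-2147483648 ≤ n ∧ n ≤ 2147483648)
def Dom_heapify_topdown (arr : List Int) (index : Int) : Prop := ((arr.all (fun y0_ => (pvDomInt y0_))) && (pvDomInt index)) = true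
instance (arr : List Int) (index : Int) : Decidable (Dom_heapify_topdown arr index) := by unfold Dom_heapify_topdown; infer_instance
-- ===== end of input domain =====

-- B counts ancestors greater than the sifted value in a read-only scan instead of A's
-- swap-and-repeat loop; equivalence is about the RETURN value only (A mutates arr, B does not).

-- A-side termination helper: when the parent index is nonnegative, it is strictly
-- below the current index (cited by decreasing_by).
theorem pvParent_lt (index : Int) (h : 0 ≤ PySem.Int.floordiv (index - 1) 2) :
    (PySem.Int.floordiv (index - 1) 2).toNat < index.toNat := by
  rw [PySem.Int.floordiv_eq_ediv_of_pos (by norm_num)] at h ⊢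
  omega

-- ===== PORT A =====
-- A's while loop: state (arr, index, count); each pass swaps arr[index] with its parent.
-- In the executed branch 0 ≤ root < index, so List.set at .toNat is Python's assignment exactly.
def heapify_topdown_loop (arr : List Int) (index : Int) (count : Int) : Int :=
  let root := PySem.Int.floordiv (index - 1) 2
  if h : 0 ≤ root then
    match PySem.List.pyGet? arr index, PySem.List.pyGet? arr root with
    | some ai, some ar =>
      if ai < ar then
        heapify_topdown_loop ((arr.set index.toNat ar).set root.toNat ai) root (count + 1)
      else count
    | _, _ => count   -- IndexError in Python: excluded by Pre_
  else count
termination_by index.toNat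
decreasing_by exact pvParent_lt index h

def heapify_topdown (arr : List Int) (index : Int) : Int :=
  heapify_topdown_loop arr index 0

-- ===== PORT B =====
-- B's while loop: walk up the parent chain comparing the fixed value v, no writes.
def heapify_topdown_alt_go (arr : List Int) (v : Int) (i : Int) (count : Int) : Int :=
  if h : 0 ≤ i then
    match PySem.List.pyGet? arr i with
    | some ai =>
      if v < ai then
        heapify_topdown_alt_go arr v (PySem.Int.floordiv (i - 1) 2) (count + 1)
      else count
    | none => count   -- IndexError in Python: excluded by Pre_
  else count
termination_by (i + 1).toNat
decreasing_by
  rw [PySem.Int.floordiv_eq_ediv_of_pos (by norm_num)]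
  omega

def heapify_topdown_alt (arr : List Int) (index : Int) : Int :=
  if PySem.Int.floordiv (index - 1) 2 < 0 then 0
  else
    match PySem.List.pyGet? arr index with
    | some v => heapify_topdown_alt_go arr v (PySem.Int.floordiv (index - 1) 2) 0
    | none => 0   -- IndexError in Python: excluded by Pre_

-- ===== PRECONDITION & SPEC =====
-- Pre_ excludes exactly the inputs where Python A raises IndexError (index ≥ 1 with index ≥ len(arr)).
def Pre_heapify_topdown (arr : List Int) (index : Int) : Prop :=
  index ≤ 0 ∨ index < arr.length
instance (arr : List Int) (index : Int) : Decidable (Pre_heapify_topdown arr index) := by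
  unfold Pre_heapify_topdown; infer_instance

def pvWitness_heapify_topdown : List Int × Int := ([3, 1, 2], 2)

def Spec_heapify_topdown (arr : List Int) (index : Int) (out : Int) : Prop := out = heapify_topdown_alt arr index
instance (arr : List Int) (index : Int) (out : Int) : Decidable (Spec_heapify_topdown arr index out) := by unfold Spec_heapify_topdown; infer_instance

-- ===== CLAIM (what is proved, stated in full; the proofs are below) =====
def Claim_equal_heapify_topdown : Prop := ∀ (arr : List Int) (index : Int), Dom_heapify_topdown arr index → Pre_heapify_topdown arr index → Spec_heapify_topdown arr index (heapify_topdown arr index)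

-- ===== LEMMAS AND PROOFS =====

-- floor division by 2 is Int ediv by 2 (omega-friendly)
theorem fd2 (a : Int) : PySem.Int.floordiv a 2 = a / 2 :=
  PySem.Int.floordiv_eq_ediv_of_pos (by norm_num)

theorem fd2_lt (x : Int) (h : 0 ≤ x) : PySem.Int.floordiv (x - 1) 2 < x := by
  rw [fd2]; omega

-- one-step unfolding facts for the two recursions
theorem alt_go_neg (arr : List Int) (v i count : Int) (h : ¬ 0 ≤ i) :
    heapify_topdown_alt_go arr v i count = count := by
  rw [heapify_topdown_alt_go, dif_neg h]

theorem alt_go_none (arr : List Int) (v i count : Int) (h : 0 ≤ i)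
    (hg : PySem.List.pyGet? arr i = none) :
    heapify_topdown_alt_go arr v i count = count := by
  rw [heapify_topdown_alt_go, dif_pos h, hg]

theorem alt_go_pos (arr : List Int) (v i count ai : Int) (h : 0 ≤ i)
    (hg : PySem.List.pyGet? arr i = some ai) :
    heapify_topdown_alt_go arr v i count =
      if v < ai then heapify_topdown_alt_go arr v (PySem.Int.floordiv (i - 1) 2) (count + 1)
      else count := by
  rw [heapify_topdown_alt_go, dif_pos h, hg]

theorem loop_neg (arr : List Int) (index count : Int)
    (h : ¬ 0 ≤ PySem.Int.floordiv (index - 1) 2) :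
    heapify_topdown_loop arr index count = count := by
  rw [heapify_topdown_loop, dif_neg h]

theorem loop_pos (arr : List Int) (index count ai ar : Int)
    (h : 0 ≤ PySem.Int.floordiv (index - 1) 2)
    (hi : PySem.List.pyGet? arr index = some ai)
    (hr : PySem.List.pyGet? arr (PySem.Int.floordiv (index - 1) 2) = some ar) :
    heapify_topdown_loop arr index count =
      if ai < ar then
        heapify_topdown_loop
          ((arr.set index.toNat ar).set (PySem.Int.floordiv (index - 1) 2).toNat ai)
          (PySem.Int.floordiv (index - 1) 2) (count + 1)
      else count := by
  rw [heapify_topdown_loop, dif_pos h, hi, hr]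

-- alt_go only reads positions ≤ i, so arrays agreeing there are interchangeable.
theorem alt_go_congr (m : Nat) : ∀ (arr arr' : List Int) (v i count : Int),
    (i + 1).toNat ≤ m → (∀ k : Nat, (k : Int) ≤ i → arr'[k]? = arr[k]?) →
    heapify_topdown_alt_go arr' v i count = heapify_topdown_alt_go arr v i count := by
  induction m with
  | zero =>
    intro arr arr' v i count hm hagree
    have hi : ¬ 0 ≤ i := by omega
    rw [alt_go_neg arr v i count hi, alt_go_neg arr' v i count hi]
  | succ m ih =>
    intro arr arr' v i count hm hagree
    by_cases hi : 0 ≤ i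
    · have hget : PySem.List.pyGet? arr' i = PySem.List.pyGet? arr i := by
        rw [PySem.List.pyGet?_of_nonneg arr' hi, PySem.List.pyGet?_of_nonneg arr hi]
        exact hagree i.toNat (by omega)
      cases hg : PySem.List.pyGet? arr i with
      | none =>
        rw [alt_go_none arr v i count hi hg, alt_go_none arr' v i count hi (hget.trans hg)]
      | some ai =>
        rw [alt_go_pos arr v i count ai hi hg,
            alt_go_pos arr' v i count ai hi (hget.trans hg)]
        by_cases hlt : v < ai
        · rw [if_pos hlt, if_pos hlt]
          have hj := fd2_lt i hi
          apply ih
          · omega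
          · intro k hk
            exact hagree k (by omega)
        · rw [if_neg hlt, if_neg hlt]
    · rw [alt_go_neg arr v i count hi, alt_go_neg arr' v i count hi]

-- main invariant: A's loop from a nonnegative in-range index equals B's scan with v = arr[index].
theorem loop_eq_alt_go (n : Nat) : ∀ (arr : List Int) (index count v : Int),
    index.toNat ≤ n → 0 ≤ index → PySem.List.pyGet? arr index = some v →
    heapify_topdown_loop arr index count =
      heapify_topdown_alt_go arr v (PySem.Int.floordiv (index - 1) 2) count := by
  induction n with
  | zero =>
    intro arr index count v hn h0 hv
    have hidx : index = 0 := by omega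
    subst hidx
    have hneg : ¬ 0 ≤ PySem.Int.floordiv (0 - 1 : Int) 2 := by
      rw [fd2]; decide
    rw [loop_neg arr 0 count hneg, alt_go_neg arr v _ count hneg]
  | succ n ih =>
    intro arr index count v hn h0 hv
    by_cases hr : 0 ≤ PySem.Int.floordiv (index - 1) 2
    · have hroot_lt := fd2_lt index h0
      have hvn : arr[index.toNat]? = some v := by
        rw [← PySem.List.pyGet?_of_nonneg arr h0]; exact hv
      have hlen : index.toNat < arr.length := (List.getElem?_eq_some_iff.mp hvn).1
      have hrl : (PySem.Int.floordiv (index - 1) 2).toNat < arr.length := by omega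
      have hgr : PySem.List.pyGet? arr (PySem.Int.floordiv (index - 1) 2)
          = some arr[(PySem.Int.floordiv (index - 1) 2).toNat] :=
        PySem.List.pyGet?_eq_some_getElem arr hr (by omega)
      rw [loop_pos arr index count v arr[(PySem.Int.floordiv (index - 1) 2).toNat] hr hv hgr,
          alt_go_pos arr v _ count arr[(PySem.Int.floordiv (index - 1) 2).toNat] hr hgr]
      by_cases hlt : v < arr[(PySem.Int.floordiv (index - 1) 2).toNat]
      · rw [if_pos hlt, if_pos hlt]
        have hv' : PySem.List.pyGet?
            ((arr.set index.toNat arr[(PySem.Int.floordiv (index - 1) 2).toNat]).set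
              (PySem.Int.floordiv (index - 1) 2).toNat v)
            (PySem.Int.floordiv (index - 1) 2) = some v := by
          rw [PySem.List.pyGet?_of_nonneg _ hr]
          rw [List.getElem?_set_self (by simpa using hrl)]
        rw [ih _ _ (count + 1) v (by omega) hr hv']
        have hj := fd2_lt (PySem.Int.floordiv (index - 1) 2) hr
        apply alt_go_congr arr.length _ _ v _ _ (by omega)
        intro k hk
        have hk2 : (k : Int) < PySem.Int.floordiv (index - 1) 2 := by omega
        rw [List.getElem?_set_ne (by omega), List.getElem?_set_ne (by omega)]
      · rw [if_neg hlt, if_neg hlt]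
    · rw [loop_neg arr index count hr, alt_go_neg arr v _ count hr]

-- ===== VERDICT (by name: the statement is the Claim_ definition above) =====
theorem heapify_topdown_spec : Claim_equal_heapify_topdown := by
  intro arr index _ hpre
  unfold Spec_heapify_topdown heapify_topdown heapify_topdown_alt
  by_cases hr : PySem.Int.floordiv (index - 1) 2 < 0
  · rw [loop_neg arr index 0 (by omega), if_pos hr]
  · have h0 : 0 ≤ PySem.Int.floordiv (index - 1) 2 := by omega
    have h1 : 1 ≤ index := by
      by_contra h
      have : PySem.Int.floordiv (index - 1) 2 < 0 := by rw [fd2]; omega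
      omega
    have hlen : index < (arr.length : Int) := by
      rcases hpre with h | h
      · omega
      · exact h
    have hv : PySem.List.pyGet? arr index = some arr[index.toNat] :=
      PySem.List.pyGet?_eq_some_getElem arr (by omega) hlen
    rw [loop_eq_alt_go index.toNat arr index 0 arr[index.toNat] le_rfl (by omega) hv,
        if_neg hr, hv]
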